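-- pv_equiv track=rewrite | github.com/jayantdadhich/DSA | MI/022.Intersection_Array2.py | NumberofElementsInIntersection
-- ===== SOURCE A (Python) =====
-- def NumberofElementsInIntersection(a, b, n, m):
--     c = []
--     for i in a:
--         c.append(i)
--     for j in b:
--         c.append(j)
--     count = 0
--     d = dict()
--     for k in range(0, m+n):
--         d[k] = c.count(c[k])
--     for key, value in d.items():
--         if value != 1:
--             count  += 1
--     return count//2
-- ===== SOURCE B (Python) =====
-- def NumberofElementsInIntersection(a, b, n, m):
--     pairs = sorted(((v, i) for i, v in enumerate(a + b)), key=lambda p: p[0])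
--     total = 0
--     for p, (v, i) in enumerate(pairs):
--         if i < m + n and ((p > 0 and pairs[p - 1][0] == v)
--                           or (p + 1 < len(pairs) and pairs[p + 1][0] == v)):
--             total += 1
--     return total // 2
-- ===== Notes on version B (the rewrite author's own statement) =====
-- stated objective: faster
-- what changed: Instead of A's per-index c.count scans over the combined list, B decorates each element with its position, sorts the decorated pairs by value, and detects duplicated values by comparing each sorted entry with its immediate neighbours (equal elements are adjacent after sorting), counting the duplicated entries whose original position lies in the first m+n slots.
import Mathlib
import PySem

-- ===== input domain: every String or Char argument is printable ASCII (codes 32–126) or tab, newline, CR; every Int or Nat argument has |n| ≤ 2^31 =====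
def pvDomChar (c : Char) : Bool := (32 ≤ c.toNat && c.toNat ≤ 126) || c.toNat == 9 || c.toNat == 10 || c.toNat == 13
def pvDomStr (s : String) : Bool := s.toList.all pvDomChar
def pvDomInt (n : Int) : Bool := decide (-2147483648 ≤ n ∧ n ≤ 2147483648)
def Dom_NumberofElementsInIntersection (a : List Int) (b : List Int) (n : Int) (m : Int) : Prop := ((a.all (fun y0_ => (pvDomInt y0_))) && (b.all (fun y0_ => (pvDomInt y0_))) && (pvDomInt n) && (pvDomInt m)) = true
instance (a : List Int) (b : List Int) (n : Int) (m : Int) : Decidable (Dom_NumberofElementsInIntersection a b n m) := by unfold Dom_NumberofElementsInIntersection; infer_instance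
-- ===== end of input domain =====

-- B replaces A's quadratic per-index c.count scanning by a sort of position-decorated pairs and a
-- neighbour comparison on the sorted list to detect duplicated values (objective: faster).

-- ===== PORT A =====
def NumberofElementsInIntersection (a : List Int) (b : List Int) (n : Int) (m : Int) : Int :=
  let c := a ++ b
  let d := (PySem.List.pyRange 0 (m + n) 1).foldl
    (fun d k => d.insert k ((PySem.List.count c (PySem.List.pyGetD c k 0) : Int)))
    (PySem.Dict.empty : PySem.Dict Int Int)
  let count := d.items.foldl (fun acc kv => if kv.2 ≠ 1 then acc + 1 else acc) (0 : Int)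
  PySem.Int.floordiv count 2

-- ===== PORT B =====
def NumberofElementsInIntersection_alt (a : List Int) (b : List Int) (n : Int) (m : Int) : Int :=
  let pairs : List (Int × Int) := PySem.List.sorted ((PySem.List.enumerate (a ++ b)).map (fun p => (p.2, p.1)))
    (fun p => p.1) false
  let total := (PySem.List.enumerate pairs).foldl
    (fun acc q =>
      if q.2.2 < m + n ∧ ((0 < q.1 ∧ (PySem.List.pyGetD pairs (q.1 - 1) ((0 : Int), (0 : Int))).1 = q.2.1)
          ∨ (q.1 + 1 < (pairs.length : Int) ∧ (PySem.List.pyGetD pairs (q.1 + 1) ((0 : Int), (0 : Int))).1 = q.2.1))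
      then acc + 1 else acc) (0 : Int)
  PySem.Int.floordiv total 2

-- ===== PRECONDITION & SPEC =====
-- A raises IndexError (c[k] past the end) exactly when m+n exceeds len(a)+len(b); those inputs are excluded.
def Pre_NumberofElementsInIntersection (a : List Int) (b : List Int) (n : Int) (m : Int) : Prop :=
  m + n ≤ (a.length : Int) + (b.length : Int)
instance (a : List Int) (b : List Int) (n : Int) (m : Int) : Decidable (Pre_NumberofElementsInIntersection a b n m) := by unfold Pre_NumberofElementsInIntersection; infer_instance

def pvWitness_NumberofElementsInIntersection : List Int × List Int × Int × Int := ([1, 2], [2, 3], 2, 2)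

def Spec_NumberofElementsInIntersection (a : List Int) (b : List Int) (n : Int) (m : Int) (out : Int) : Prop := out = NumberofElementsInIntersection_alt a b n m
instance (a : List Int) (b : List Int) (n : Int) (m : Int) (out : Int) : Decidable (Spec_NumberofElementsInIntersection a b n m out) := by unfold Spec_NumberofElementsInIntersection; infer_instance

-- ===== CLAIM (what is proved, stated in full; the proofs are below) =====
def Claim_equal_NumberofElementsInIntersection : Prop := ∀ (a : List Int) (b : List Int) (n : Int) (m : Int), Dom_NumberofElementsInIntersection a b n m → Pre_NumberofElementsInIntersection a b n m → Spec_NumberofElementsInIntersection a b n m (NumberofElementsInIntersection a b n m)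

-- ===== LEMMAS AND PROOFS =====

theorem pv_two_le_count_of_adj {s : List Int} {k : Nat} (hk : k < s.length)
    (h : (0 < k ∧ s.getD (k-1) 0 = s.getD k 0) ∨ (k+1 < s.length ∧ s.getD (k+1) 0 = s.getD k 0)) :
    2 ≤ s.count (s.getD k 0) := by
  have key : ∀ j, j + 1 < s.length → s.getD j 0 = s.getD (j+1) 0 → 2 ≤ s.count (s.getD (j+1) 0) := by
    intro j hj hv
    have h1 : s.drop j = s[j]'(by omega) :: s[j+1] :: s.drop (j+2) := by
      rw [List.drop_eq_getElem_cons (by omega), List.drop_eq_getElem_cons (by omega)]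
    have hle : (s.drop j).count (s.getD (j+1) 0) ≤ s.count (s.getD (j+1) 0) :=
      List.Sublist.count_le _ (List.drop_sublist ..)
    have e1 : s.getD j 0 = s[j]'(by omega) := List.getD_eq_getElem s 0 (by omega)
    have e2 : s.getD (j+1) 0 = s[j+1] := List.getD_eq_getElem s 0 hj
    have hjj : s[j]'(by omega) = s[j+1] := by rw [← e1, ← e2, hv]
    rw [h1, e2, hjj] at hle
    rw [e2]
    simp only [List.count_cons_self] at hle
    omega
  rcases h with ⟨hk0, he⟩ | ⟨hk1, he⟩
  · have hkk : k - 1 + 1 = k := by omega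
    have := key (k-1) (by omega) (by rw [hkk]; exact he)
    rwa [hkk] at this
  · have := key k hk1 he.symm
    rwa [← he]

theorem pv_exists_two_idx {s : List Int} {v : Int} (h : 2 ≤ s.count v) :
    ∃ (i j : Nat), i < j ∧ j < s.length ∧ s.getD i 0 = v ∧ s.getD j 0 = v := by
  induction s with
  | nil => simp at h
  | cons x t ih =>
    by_cases hx : x = v
    · subst hx
      have h1 : 1 ≤ t.count x := by
        rw [List.count_cons_self] at h
        omega
      have hv : x ∈ t := List.count_pos_iff.mp (by omega : 0 < t.count x)
      obtain ⟨i, hi, he⟩ := List.mem_iff_getElem.mp hv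
      exact ⟨0, i+1, by omega, by simpa using by omega,
        by simp,
        by simpa [List.getD_cons_succ] using (List.getD_eq_getElem t 0 hi).trans he⟩
    · have h2 : 2 ≤ t.count v := by
        rwa [List.count_cons_of_ne hx] at h
      obtain ⟨i, j, hij, hj, hgi, hgj⟩ := ih h2
      exact ⟨i+1, j+1, by omega, by simpa using by omega,
        by simpa [List.getD_cons_succ] using hgi,
        by simpa [List.getD_cons_succ] using hgj⟩

theorem pv_adj_of_two_le_count {s : List Int} (hs : s.Pairwise (· ≤ ·)) {k : Nat}
    (hk : k < s.length) (h2 : 2 ≤ s.count (s.getD k 0)) :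
    (0 < k ∧ s.getD (k-1) 0 = s.getD k 0) ∨ (k+1 < s.length ∧ s.getD (k+1) 0 = s.getD k 0) := by
  have hmono : ∀ p q : Nat, p ≤ q → q < s.length → s.getD p 0 ≤ s.getD q 0 := by
    intro p q hpq hq
    rcases Nat.lt_or_ge p q with hlt | hge
    · have := (List.pairwise_iff_getElem.mp hs) p q (by omega) hq hlt
      rwa [List.getD_eq_getElem s 0 (by omega), List.getD_eq_getElem s 0 hq]
    · have : p = q := by omega
      simp [this]
  obtain ⟨i, j, hij, hj, hgi, hgj⟩ := pv_exists_two_idx h2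
  by_contra hc
  push_neg at hc
  rcases Nat.lt_or_ge k j with hkj | hjk
  · have hk1 : k + 1 < s.length := by omega
    have a1 : s.getD k 0 ≤ s.getD (k+1) 0 := hmono k (k+1) (by omega) hk1
    have a2 : s.getD (k+1) 0 ≤ s.getD j 0 := hmono (k+1) j (by omega) hj
    have : s.getD (k+1) 0 = s.getD k 0 := by rw [hgj] at a2; omega
    exact hc.2 hk1 this
  · have hik : i < k := by omega
    have a1 : s.getD i 0 ≤ s.getD (k-1) 0 := hmono i (k-1) (by omega) (by omega)
    have a2 : s.getD (k-1) 0 ≤ s.getD k 0 := hmono (k-1) k (by omega) hk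
    have : s.getD (k-1) 0 = s.getD k 0 := by rw [hgi] at a1; omega
    exact hc.1 (by omega) this

theorem pv_countP_range_limit (L : Nat) (limit : Int) (hL : limit ≤ (L : Int)) (Q : Nat → Bool) :
    (List.range L).countP (fun k : Nat => (decide ((k : Int) < limit) && Q k))
      = (List.range limit.toNat).countP Q := by
  rcases (by omega : limit ≤ 0 ∨ 0 < limit) with h0 | h0
  · have ht : limit.toNat = 0 := by omega
    rw [ht]
    simp only [List.range_zero, List.countP_nil]
    apply List.countP_eq_zero.mpr
    intro k hk
    simp only [Bool.and_eq_true, decide_eq_true_eq]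
    rintro ⟨h1, -⟩
    omega
  · have ht : limit.toNat ≤ L := by omega
    rw [show L = limit.toNat + (L - limit.toNat) by omega, List.range_add, List.countP_append]
    have e1 : (List.range limit.toNat).countP (fun k : Nat => (decide ((k : Int) < limit) && Q k))
        = (List.range limit.toNat).countP Q := by
      apply List.countP_congr
      intro k hk
      simp only [List.mem_range] at hk
      have hkl : (k : Int) < limit := by omega
      simp [hkl]
    have e2 : ((List.range (L - limit.toNat)).map (limit.toNat + ·)).countP
        (fun k : Nat => (decide ((k : Int) < limit) && Q k)) = 0 := by
      rw [List.countP_map]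
      apply List.countP_eq_zero.mpr
      intro k hk
      simp only [Function.comp, Bool.and_eq_true, decide_eq_true_eq]
      rintro ⟨h1, -⟩
      omega
    rw [e1, e2]
    omega

-- ===== VERDICT (by name: the statement is the Claim_ definition above) =====
theorem NumberofElementsInIntersection_spec : Claim_equal_NumberofElementsInIntersection := by
  intro a b n m _ hpre
  unfold Spec_NumberofElementsInIntersection
  unfold NumberofElementsInIntersection NumberofElementsInIntersection_alt
  unfold Pre_NumberofElementsInIntersection at hpre
  set c := a ++ b with hc
  set pairs : List (Int × Int) :=
    PySem.List.sorted ((PySem.List.enumerate c).map (fun p => (p.2, p.1))) (fun p => p.1) false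
    with hpairs
  set s : List Int := pairs.map (fun p => p.1) with hsdef
  have hlenc : (m + n).toNat ≤ c.length := by simp [hc]; omega
  -- A's dict is built over fresh distinct keys, so its items list is a map
  have hitems : ((PySem.List.pyRange 0 (m + n) 1).foldl
      (fun d k => d.insert k ((PySem.List.count c (PySem.List.pyGetD c k 0) : Int)))
      (PySem.Dict.empty : PySem.Dict Int Int)).items
      = (PySem.List.pyRange 0 (m + n) 1).map
          (fun k => (k, (PySem.List.count c (PySem.List.pyGetD c k 0) : Int))) := by
    have := PySem.Dict.items_foldl_insert_fresh
      (l := PySem.List.pyRange 0 (m + n) 1)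
      (k := fun x => x)
      (v := fun k => ((PySem.List.count c (PySem.List.pyGetD c k 0) : Int)))
      (d := (PySem.Dict.empty : PySem.Dict Int Int))
      (by intro x _; simp [PySem.Dict.contains_empty])
      (by simpa using PySem.List.nodup_pyRange_one 0 (m + n))
    simpa using this
  simp only [hitems]
  rw [PySem.List.foldl_ite_add_one, PySem.List.foldl_ite_add_one]
  congr 2
  -- A-side: reduce to a countP over List.range (m+n).toNat
  rw [List.countP_map]
  conv_lhs => rw [PySem.List.pyRange_one]
  rw [List.countP_map]
  have hAside : (List.range (m + n - 0).toNat).countP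
      (((fun kv : Int × Int => decide (kv.2 ≠ 1)) ∘
        (fun k => (k, (PySem.List.count c (PySem.List.pyGetD c k 0) : Int)))) ∘ (fun k : Nat => 0 + (k : Int)))
      = (List.range (m + n).toNat).countP
          (fun k : Nat => decide (((c.count (c.getD k 0) : Int)) ≠ 1)) := by
    rw [show (m + n - 0).toNat = (m + n).toNat by omega]
    apply List.countP_congr
    intro k _
    simp [Function.comp, PySem.List.pyGetD_natCast, PySem.List.count]
  rw [hAside]
  -- B-side: pointwise rewrite of the neighbour test, then transport along the sort permutation
  have hperm : s.Perm c := by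
    have h1 : pairs.Perm ((PySem.List.enumerate c).map (fun p => (p.2, p.1))) :=
      PySem.List.sorted_perm _ _ _
    have h2 := h1.map (fun p : Int × Int => p.1)
    rw [hsdef]
    refine h2.trans ?_
    rw [List.map_map]
    have : ((fun p : Int × Int => p.1) ∘ (fun p : Int × Int => (p.2, p.1)))
        = (fun p : Int × Int => p.2) := rfl
    rw [this]
    have := PySem.List.map_snd_enumerate (xs := c) (s := 0)
    simp only [this]
    exact List.Perm.refl c
  have hsort : s.Pairwise (· ≤ ·) := by
    rw [hsdef, hpairs]
    exact PySem.List.sorted_map_key_pairwise _ _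
  have hslen : s.length = pairs.length := by rw [hsdef]; simp
  -- the neighbour test at entry (i, pairs[k]) equals the multiplicity test
  have hpoint : ∀ q ∈ PySem.List.enumerate pairs 0,
      (decide (q.2.2 < m + n ∧ ((0 < q.1 ∧ (PySem.List.pyGetD pairs (q.1 - 1) (0, 0)).1 = q.2.1)
          ∨ (q.1 + 1 < (pairs.length : Int) ∧ (PySem.List.pyGetD pairs (q.1 + 1) (0, 0)).1 = q.2.1))))
      = (decide (q.2.2 < m + n) && decide (((c.count q.2.1 : Int)) ≠ 1)) := by
    intro q hq
    obtain ⟨k, hk, rfl⟩ := (PySem.List.mem_enumerate_iff _ _ _).mp hq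
    dsimp only
    have hks : k < s.length := by omega
    have hsg : ∀ (i : Nat), i < pairs.length → s.getD i 0 = (pairs.getD i (0, 0)).1 := by
      intro i h
      rw [hsdef]
      rw [List.getD_eq_getElem _ 0 (by simpa using h), List.getElem_map,
        List.getD_eq_getElem _ _ h]
    have hfst : pairs[k].1 = s.getD k 0 := by
      rw [hsg k hk, List.getD_eq_getElem _ _ hk]
    have hcnt_pos : 1 ≤ s.count (s.getD k 0) := by
      apply List.count_pos_iff.mpr
      rw [List.getD_eq_getElem _ 0 hks]
      exact List.getElem_mem hks
    have hcc : c.count (s.getD k 0) = s.count (s.getD k 0) := (hperm.count_eq _).symm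
    have hadj : ((0 < (0 + (k:Int)) ∧ (PySem.List.pyGetD pairs ((0 + (k:Int)) - 1) (0, 0)).1 = pairs[k].1)
          ∨ ((0 + (k:Int)) + 1 < (pairs.length : Int) ∧ (PySem.List.pyGetD pairs ((0 + (k:Int)) + 1) (0, 0)).1 = pairs[k].1))
        ↔ ((0 < k ∧ s.getD (k-1) 0 = s.getD k 0) ∨ (k+1 < s.length ∧ s.getD (k+1) 0 = s.getD k 0)) := by
      constructor
      · rintro (⟨h0, he⟩ | ⟨h0, he⟩)
        · left
          refine ⟨by omega, ?_⟩
          rw [show (0 + (k:Int)) - 1 = ((k - 1 : Nat) : Int) by omega, PySem.List.pyGetD_natCast] at he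
          rw [hsg (k-1) (by omega), he, hfst]
        · right
          refine ⟨by omega, ?_⟩
          rw [show (0 + (k:Int)) + 1 = ((k + 1 : Nat) : Int) by omega, PySem.List.pyGetD_natCast] at he
          rw [hsg (k+1) (by omega), he, hfst]
      · rintro (⟨h0, he⟩ | ⟨h0, he⟩)
        · left
          refine ⟨by omega, ?_⟩
          rw [show (0 + (k:Int)) - 1 = ((k - 1 : Nat) : Int) by omega, PySem.List.pyGetD_natCast]
          rw [← hsg (k-1) (by omega), he, hfst]
        · right
          refine ⟨by omega, ?_⟩
          rw [show (0 + (k:Int)) + 1 = ((k + 1 : Nat) : Int) by omega, PySem.List.pyGetD_natCast]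
          rw [← hsg (k+1) (by omega), he, hfst]
    have hmult : ((0 < k ∧ s.getD (k-1) 0 = s.getD k 0) ∨ (k+1 < s.length ∧ s.getD (k+1) 0 = s.getD k 0))
        ↔ ((c.count pairs[k].1 : Int) ≠ 1) := by
      rw [hfst, hcc]
      constructor
      · intro h
        have := pv_two_le_count_of_adj hks h
        omega
      · intro h
        exact pv_adj_of_two_le_count hsort hks (by omega)
    rw [decide_eq_decide.mpr (and_congr Iff.rfl (hadj.trans hmult))]
    · simp
    · infer_instance
  have hcongr : (PySem.List.enumerate pairs 0).countP
      (fun q => decide (q.2.2 < m + n ∧ ((0 < q.1 ∧ (PySem.List.pyGetD pairs (q.1 - 1) (0, 0)).1 = q.2.1)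
          ∨ (q.1 + 1 < (pairs.length : Int) ∧ (PySem.List.pyGetD pairs (q.1 + 1) (0, 0)).1 = q.2.1))))
      = (PySem.List.enumerate pairs 0).countP
          (fun q => decide (q.2.2 < m + n) && decide (((c.count q.2.1 : Int)) ≠ 1)) :=
    List.countP_congr (fun q hq => by rw [hpoint q hq])
  rw [hcongr]
  have hsplit : (PySem.List.enumerate pairs 0).countP
      (fun q => decide (q.2.2 < m + n) && decide (((c.count q.2.1 : Int)) ≠ 1))
      = pairs.countP (fun p : Int × Int => decide (p.2 < m + n) && decide (((c.count p.1 : Int)) ≠ 1)) := by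
    conv_rhs => rw [← PySem.List.map_snd_enumerate (xs := pairs) (s := 0)]
    rw [List.countP_map]
    rfl
  rw [hsplit]
  have hsortperm : pairs.Perm ((PySem.List.enumerate c).map (fun p => (p.2, p.1))) :=
    PySem.List.sorted_perm _ _ _
  rw [hsortperm.countP_eq]
  rw [List.countP_map]
  rw [PySem.List.enumerate_eq_map_pyRange (d := 0)]
  rw [List.countP_map]
  simp only [PySem.List.len_eq]
  rw [PySem.List.pyRange_zero_natCast]
  rw [List.countP_map]
  have hBside : (List.range c.length).countP
      ((((fun p : Int × Int => decide (p.2 < m + n) && decide (((c.count p.1 : Int)) ≠ 1)) ∘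
          (fun p : Int × Int => (p.2, p.1))) ∘
        (fun j : Int => (j, PySem.List.pyGetD c j 0))) ∘ (fun k : Nat => (k : Int)))
      = (List.range c.length).countP
          (fun k : Nat => (decide ((k : Int) < m + n)
            && (fun k : Nat => decide (((c.count (c.getD k 0) : Int)) ≠ 1)) k)) := by
    apply List.countP_congr
    intro k _
    simp [Function.comp, PySem.List.pyGetD_natCast]
  rw [hBside]
  rw [pv_countP_range_limit c.length (m + n) (by omega) _]
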